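-- pv_equiv track=rewrite | github.com/minicube707/python--Projet | QR Code/QR_Code1.py | penalty_run
-- ===== SOURCE A (Python) =====
-- def penalty_run(line):
--     penalty = 0
--     current = line[0]
--     length = 1
--
--     for v in line[1:]:
--         if v == current:
--             length += 1
--         else:
--             if length >= 5:
--                 penalty += 3 + (length - 5)
--             current = v
--             length = 1
--
--     #Last run
--     if length >= 5:
--         penalty += 3 + (length - 5)
--
--     return penalty
-- ===== SOURCE B (Python) =====
-- def penalty_run(line):
--     # Stage 1: build the run-length encoding of the line.
--     runs = []
--     for v in line:
--         if runs and runs[-1][0] == v: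
--             runs[-1] = (v, runs[-1][1] + 1)
--         else:
--             runs.append((v, 1))
--     # Stage 2: sum the penalty over the runs.
--     return sum(3 + (n - 5) for _, n in runs if n >= 5)
-- ===== Notes on version B (the rewrite author's own statement) =====
-- stated objective: alternative
-- what changed: Replaced A's current/length state machine (with its duplicated final-run handling) by two staged passes: build the explicit run-length encoding of the line, then sum 3+(n-5) over the runs of length >= 5; the empty list, on which A raises IndexError, is outside Pre_ and B returns 0 there.
-- outside the precondition, e.g. on penalty_run([]): A raises IndexError, B returns 0
import Mathlib
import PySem

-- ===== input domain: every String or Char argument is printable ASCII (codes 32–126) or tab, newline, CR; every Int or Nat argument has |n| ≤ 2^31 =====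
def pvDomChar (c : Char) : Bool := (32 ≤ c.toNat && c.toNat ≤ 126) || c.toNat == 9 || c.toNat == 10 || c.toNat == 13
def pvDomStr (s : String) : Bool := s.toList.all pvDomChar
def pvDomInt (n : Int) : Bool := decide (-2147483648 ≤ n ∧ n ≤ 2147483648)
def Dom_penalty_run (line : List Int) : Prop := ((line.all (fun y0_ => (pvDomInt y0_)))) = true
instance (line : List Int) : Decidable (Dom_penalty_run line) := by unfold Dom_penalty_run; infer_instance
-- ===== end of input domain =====

-- B replaces A's current/length state machine by two staged passes: build the
-- run-length encoding, then sum the penalties over it. Same cost, different decomposition.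
-- On the empty list A raises IndexError (excluded by Pre_); B returns 0 there.

-- ===== PORT A =====
-- the for-loop over line[1:] with state (penalty, current, length); A's trailing
-- 'if length >= 5' after the loop is the base case.
def penaltyLoopA (penalty current length : Int) : List Int → Int
  | [] => if length ≥ 5 then penalty + (3 + (length - 5)) else penalty
  | v :: rest =>
      if v = current then penaltyLoopA penalty current (length + 1) rest
      else
        penaltyLoopA (if length ≥ 5 then penalty + (3 + (length - 5)) else penalty) v 1 rest

def penalty_run (line : List Int) : Int :=
  match line with
  | [] => 0           -- line[0] raises IndexError in Python: excluded by Pre_penalty_run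
  | x :: rest => penaltyLoopA 0 x 1 rest

-- ===== PORT B =====
-- one iteration of B's RLE-building loop: extend the last run or append a new one
def rleStep (runs : List (Int × Int)) (v : Int) : List (Int × Int) :=
  match runs.getLast? with
  | some (c, n) => if c = v then runs.dropLast ++ [(c, n + 1)] else runs ++ [(v, 1)]
  | none => [(v, 1)]

def penalty_run_alt (line : List Int) : Int :=
  (((line.foldl rleStep []).filter (fun p => p.2 ≥ 5)).map (fun p => 3 + (p.2 - 5))).sum

-- ===== PRECONDITION & SPEC =====
-- Python A evaluates line[0] first: the empty list raises IndexError.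
def Pre_penalty_run (line : List Int) : Prop := line ≠ []
instance (line : List Int) : Decidable (Pre_penalty_run line) := by unfold Pre_penalty_run; infer_instance
def pvWitness_penalty_run : List Int := [1, 1, 1, 1, 1, 2]

def Spec_penalty_run (line : List Int) (out : Int) : Prop := out = penalty_run_alt line
instance (line : List Int) (out : Int) : Decidable (Spec_penalty_run line out) := by unfold Spec_penalty_run; infer_instance

-- ===== CLAIM (what is proved, stated in full; the proofs are below) =====
def Claim_equal_penalty_run : Prop := ∀ (line : List Int), Dom_penalty_run line → Pre_penalty_run line → Spec_penalty_run line (penalty_run line)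

-- ===== LEMMAS AND PROOFS =====

def score (runs : List (Int × Int)) : Int :=
  ((runs.filter (fun p => p.2 ≥ 5)).map (fun p => 3 + (p.2 - 5))).sum

lemma score_append (a b : List (Int × Int)) : score (a ++ b) = score a + score b := by
  simp [score]

lemma score_single (c l : Int) : score [(c, l)] = if l ≥ 5 then 3 + (l - 5) else 0 := by
  simp only [score]
  by_cases h : l ≥ 5 <;> simp [h]

lemma rleStep_ne_nil (runs : List (Int × Int)) (v : Int) : rleStep runs v ≠ [] := by
  unfold rleStep
  split
  · split <;> simp
  · simp

lemma foldl_rleStep_prefix (xs : List Int) : ∀ (done rs : List (Int × Int)), rs ≠ [] →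
    xs.foldl rleStep (done ++ rs) = done ++ xs.foldl rleStep rs := by
  induction xs with
  | nil => intro done rs _; simp
  | cons v rest ih =>
      intro done rs hne
      have hstep : rleStep (done ++ rs) v = done ++ rleStep rs v := by
        unfold rleStep
        rw [List.getLast?_append_of_ne_nil done hne]
        cases h : rs.getLast? with
        | none => exact absurd (List.getLast?_eq_none_iff.mp h) hne
        | some p =>
            cases p with
            | mk c n =>
                rw [List.dropLast_append_of_ne_nil hne]
                split <;> rename_i heq
                · split_ifs <;> simp
                · simp_all
      simp only [List.foldl_cons, hstep]
      exact ih done (rleStep rs v) (rleStep_ne_nil rs v)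

lemma penaltyLoopA_eq_score (xs : List Int) : ∀ (p c l : Int),
    penaltyLoopA p c l xs = p + score (xs.foldl rleStep [(c, l)]) := by
  induction xs with
  | nil =>
      intro p c l
      rw [penaltyLoopA, List.foldl_nil, score_single]
      split_ifs <;> ring
  | cons v rest ih =>
      intro p c l
      by_cases h : v = c
      · subst h
        rw [penaltyLoopA, if_pos rfl, ih, List.foldl_cons]
        have : rleStep [(v, l)] v = [(v, l + 1)] := by simp [rleStep]
        rw [this]
      · rw [penaltyLoopA, if_neg h, ih, List.foldl_cons]
        have : rleStep [(c, l)] v = [(c, l)] ++ [(v, 1)] := by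
          simp [rleStep, Ne.symm h]
        rw [this, foldl_rleStep_prefix rest [(c, l)] [(v, 1)] (by simp),
          score_append, score_single]
        split_ifs <;> ring

-- ===== VERDICT (by name: the statement is the Claim_ definition above) =====
theorem penalty_run_spec : Claim_equal_penalty_run := by
  intro line _ hpre
  unfold Spec_penalty_run
  match line with
  | [] => exact absurd rfl hpre
  | x :: rest =>
      show penaltyLoopA 0 x 1 rest = penalty_run_alt (x :: rest)
      rw [penaltyLoopA_eq_score]
      unfold penalty_run_alt
      have : rleStep [] x = [(x, 1)] := by simp [rleStep]
      rw [List.foldl_cons, this]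
      simp [score]
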